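-- pv_equiv track=rewrite | github.com/yuinaz/discord-bot-railway | satpambot/bot/modules/discord_bot/cogs/a08_kuliah_stage_reset_runtime_overlay.py | _current_kuliah_stage
-- ===== SOURCE A (Python) =====
-- from typing import Dict, Tuple, Optional, List
--
-- def _pairs_sorted(mp: Dict[str,int]) -> List[Tuple[str,int]]:
--     items = []
--     for k,v in mp.items():
--         try:
--             items.append((k, int(v)))
--         except Exception:
--             pass
--     items.sort(key=lambda x: x[1])
--     return items
--
-- def _current_kuliah_stage(total: int, kuliah_map: Dict[str,int]) -> Tuple[str,int,int]:
--     pairs = _pairs_sorted(kuliah_map) or [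
--         ("S1", 19000), ("S2", 35000), ("S3", 58000), ("S4", 70000),
--         ("S5", 96500), ("S6", 158000), ("S7", 220000), ("S8", 262500)
--     ]
--     stage = pairs[0][0]
--     low = 0
--     high = pairs[0][1]
--     for i, (name, thr) in enumerate(pairs):
--         if total >= thr:
--             stage = name
--             low = thr
--             high = pairs[i+1][1] if i+1 < len(pairs) else thr
--         else:
--             high = thr
--             break
--     return stage, low, high
-- ===== SOURCE B (Python) =====
-- from typing import Dict, Tuple, Optional, List
--
-- def _pairs_sorted(mp: Dict[str,int]) -> List[Tuple[str,int]]: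
--     items = []
--     for k,v in mp.items():
--         try:
--             items.append((k, int(v)))
--         except Exception:
--             pass
--     items.sort(key=lambda x: x[1])
--     return items
--
-- def _current_kuliah_stage(total: int, kuliah_map: Dict[str,int]) -> Tuple[str,int,int]:
--     pairs = _pairs_sorted(kuliah_map) or [
--         ("S1", 19000), ("S2", 35000), ("S3", 58000), ("S4", 70000),
--         ("S5", 96500), ("S6", 158000), ("S7", 220000), ("S8", 262500)
--     ]
--     thresholds = [v for _, v in pairs]
--     names = [k for k, _ in pairs]
--     # binary search: idx = number of thresholds <= total (bisect_right)
--     lo, hi = 0, len(thresholds)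
--     while lo < hi:
--         mid = (lo + hi) // 2
--         if thresholds[mid] <= total:
--             lo = mid + 1
--         else:
--             hi = mid
--     if lo == 0:
--         return names[0], 0, thresholds[0]
--     i = lo - 1
--     high = thresholds[lo] if lo < len(thresholds) else thresholds[i]
--     return names[i], thresholds[i], high
-- ===== Notes on version B (the rewrite author's own statement) =====
-- stated objective: alternative
-- what changed: A's linear scan-and-break with mutable stage/low/high state is replaced by a hand-written bisect_right binary search over the sorted threshold table, reading the bracket off the found index.
import Mathlib
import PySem

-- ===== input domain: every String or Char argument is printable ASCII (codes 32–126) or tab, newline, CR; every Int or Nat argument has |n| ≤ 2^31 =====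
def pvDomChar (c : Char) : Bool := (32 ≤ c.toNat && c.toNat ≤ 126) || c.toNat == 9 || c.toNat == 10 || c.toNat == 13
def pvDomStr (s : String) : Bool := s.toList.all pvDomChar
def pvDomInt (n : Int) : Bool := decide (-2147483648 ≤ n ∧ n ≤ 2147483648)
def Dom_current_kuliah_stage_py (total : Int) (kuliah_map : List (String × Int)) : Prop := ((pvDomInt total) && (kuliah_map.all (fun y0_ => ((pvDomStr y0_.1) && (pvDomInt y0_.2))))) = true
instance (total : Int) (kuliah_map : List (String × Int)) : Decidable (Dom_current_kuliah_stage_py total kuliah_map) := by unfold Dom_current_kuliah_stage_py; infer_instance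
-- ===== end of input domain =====

-- B replaces A's scan-and-break loop (mutable stage/low/high state) by a hand-written
-- binary search (bisect_right) over the threshold table; same return value everywhere.

-- ===== PORT A =====
-- _pairs_sorted: dict items (insertion order, unique keys), sorted stably by value
-- (the Python 'try: int(v)' never fails here since every value is already an int).
-- Source B defines the identical helper, so both ports share this definition.
def pvPairsSorted (kuliah_map : List (String × Int)) : List (String × Int) :=
  PySem.List.sorted (PySem.Dict.ofList kuliah_map).items (fun p => p.2) false

-- the default table (both sources carry the same literal)
def pvDefaultPairs : List (String × Int) :=
  [("S1", 19000), ("S2", 35000), ("S3", 58000), ("S4", 70000),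
   ("S5", 96500), ("S6", 158000), ("S7", 220000), ("S8", 262500)]

-- A's for-loop with break; 'pairs[i+1][1] if i+1 < len(pairs) else thr' is read off the
-- tail of the iteration (the next element, if any) — the same value, step for step.
def pvAGo (total : Int) (stage : String) (low high : Int) : List (String × Int) → String × Int × Int
  | [] => (stage, low, high)
  | (name, thr) :: rest =>
    if total ≥ thr then
      pvAGo total name thr (match rest with | [] => thr | (_, t) :: _ => t) rest
    else (stage, low, thr)

def current_kuliah_stage_py (total : Int) (kuliah_map : List (String × Int)) : String × Int × Int :=
  let ps := pvPairsSorted kuliah_map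
  let pairs := if ps.isEmpty then pvDefaultPairs else ps   -- 'pairs = _pairs_sorted(...) or [...]'
  let head := pairs.headD ("", 0)                          -- pairs[0] (pairs is never empty)
  pvAGo total head.1 0 head.2 pairs

-- ===== PORT B =====
-- hand-written bisect_right loop of Source B: lo/hi shrink until lo = #{thresholds ≤ total}
def pvBisect (ths : List Int) (total : Int) (lo hi : Nat) : Nat :=
  if lo < hi then
    if ths.getD ((lo + hi) / 2) 0 ≤ total then pvBisect ths total ((lo + hi) / 2 + 1) hi
    else pvBisect ths total lo ((lo + hi) / 2)
  else lo
termination_by hi - lo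
decreasing_by all_goals omega

def current_kuliah_stage_py_alt (total : Int) (kuliah_map : List (String × Int)) : String × Int × Int :=
  let ps := pvPairsSorted kuliah_map
  let pairs := if ps.isEmpty then pvDefaultPairs else ps
  let ths := pairs.map (fun p => p.2)
  let names := pairs.map (fun p => p.1)
  let idx := pvBisect ths total 0 ths.length
  if idx = 0 then (names.getD 0 "", 0, ths.getD 0 0)
  else
    (names.getD (idx - 1) "", ths.getD (idx - 1) 0,
     if idx < ths.length then ths.getD idx 0 else ths.getD (idx - 1) 0)

-- ===== PRECONDITION & SPEC =====
def Spec_current_kuliah_stage_py (total : Int) (kuliah_map : List (String × Int)) (out : String × Int × Int) : Prop := out = current_kuliah_stage_py_alt total kuliah_map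
instance (total : Int) (kuliah_map : List (String × Int)) (out : String × Int × Int) : Decidable (Spec_current_kuliah_stage_py total kuliah_map out) := by unfold Spec_current_kuliah_stage_py; infer_instance

-- ===== CLAIM (what is proved, stated in full; the proofs are below) =====
def Claim_equal_current_kuliah_stage_py : Prop := ∀ (total : Int) (kuliah_map : List (String × Int)), Dom_current_kuliah_stage_py total kuliah_map → Spec_current_kuliah_stage_py total kuliah_map (current_kuliah_stage_py total kuliah_map)

-- ===== LEMMAS AND PROOFS =====

-- elements strictly inside the takeWhile prefix satisfy the predicate
theorem pv_tw_pred {α : Type} (l : List α) (p : α → Bool) (i : Nat) (h : i < (l.takeWhile p).length) :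
    p (l[i]'(lt_of_lt_of_le h (List.takeWhile_prefix p).length_le)) = true := by
  have e := (List.takeWhile_prefix (l := l) p).getElem h
  have hm : p ((l.takeWhile p)[i]) = true := List.mem_takeWhile_imp (List.getElem_mem h)
  rwa [e] at hm

-- the element right after the takeWhile prefix fails the predicate
theorem pv_tw_fail {α : Type} (l : List α) (p : α → Bool) (h : (l.takeWhile p).length < l.length) :
    p (l[(l.takeWhile p).length]) = false := by
  induction l with
  | nil => simp at h
  | cons a t ih =>
    by_cases hp : p a
    · simp only [List.takeWhile_cons, hp, if_true, List.length_cons] at h ⊢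
      simpa using ih (by omega)
    · simp only [Bool.not_eq_true] at hp
      simp [hp]

-- a ≤-sorted list is monotone in its indices
theorem pv_getElem_mono (l : List Int) (hs : l.Pairwise (· ≤ ·)) (i j : Nat)
    (hij : i ≤ j) (hj : j < l.length) : l[i]'(lt_of_le_of_lt hij hj) ≤ l[j] := by
  rcases Nat.lt_or_eq_of_le hij with h | h
  · exact List.pairwise_iff_getElem.mp hs i j (lt_of_le_of_lt hij hj) hj h
  · subst h; exact le_refl _

-- the binary search finds the length of the ≤-prefix of a sorted list
theorem pvBisect_eq (ths : List Int) (total : Int) (lo hi K : Nat)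
    (hs : ths.Pairwise (· ≤ ·)) (hhi : hi ≤ ths.length)
    (hKdef : K = (ths.takeWhile (fun t => decide (t ≤ total))).length)
    (h1 : lo ≤ K) (h2 : K ≤ hi) :
    pvBisect ths total lo hi = K := by
  subst hKdef
  by_cases hlt : lo < hi
  · rw [pvBisect, if_pos hlt]
    have hmidlt : (lo + hi) / 2 < ths.length := by omega
    have hgd : ths.getD ((lo + hi) / 2) 0 = ths[(lo + hi) / 2] := List.getD_eq_getElem ths 0 hmidlt
    by_cases hcmp : ths.getD ((lo + hi) / 2) 0 ≤ total
    · rw [if_pos hcmp]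
      refine pvBisect_eq ths total ((lo + hi) / 2 + 1) hi _ hs hhi rfl ?_ h2
      -- mid lies inside the ≤-prefix
      by_contra hco
      have hKmid : (ths.takeWhile (fun t => decide (t ≤ total))).length ≤ (lo + hi) / 2 := by omega
      have hKlen : (ths.takeWhile (fun t => decide (t ≤ total))).length < ths.length := by omega
      have hf := pv_tw_fail ths (fun t => decide (t ≤ total)) hKlen
      simp only [decide_eq_false_iff_not, not_le] at hf
      rw [hgd] at hcmp
      exact absurd (le_trans (pv_getElem_mono ths hs _ _ hKmid hmidlt) hcmp) (not_le.mpr hf)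
    · rw [if_neg hcmp]
      refine pvBisect_eq ths total lo ((lo + hi) / 2) _ hs (by omega) rfl h1 ?_
      -- mid lies outside the ≤-prefix
      by_contra hco
      have hmidK : (lo + hi) / 2 < (ths.takeWhile (fun t => decide (t ≤ total))).length := by omega
      have := pv_tw_pred ths (fun t => decide (t ≤ total)) ((lo + hi) / 2) hmidK
      simp only [decide_eq_true_eq] at this
      rw [hgd] at hcmp
      exact hcmp this
  · rw [pvBisect, if_neg hlt]; omega
termination_by hi - lo
decreasing_by all_goals omega

-- A's loop, characterised by the length of the prefix of pairs with threshold ≤ total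
theorem pvAGo_eq (total : Int) (pairs : List (String × Int)) (stage : String) (low high : Int) :
    pvAGo total stage low high pairs =
      (if (pairs.takeWhile (fun q => decide (q.2 ≤ total))).length = 0 then
        (stage, low, (pairs.headD ("", high)).2)
      else
        ((pairs.getD ((pairs.takeWhile (fun q => decide (q.2 ≤ total))).length - 1) ("", 0)).1,
         (pairs.getD ((pairs.takeWhile (fun q => decide (q.2 ≤ total))).length - 1) ("", 0)).2,
         if (pairs.takeWhile (fun q => decide (q.2 ≤ total))).length < pairs.length then
           (pairs.getD ((pairs.takeWhile (fun q => decide (q.2 ≤ total))).length) ("", 0)).2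
         else
           (pairs.getD ((pairs.takeWhile (fun q => decide (q.2 ≤ total))).length - 1) ("", 0)).2)) := by
  induction pairs generalizing stage low high with
  | nil => simp [pvAGo]
  | cons a rest ih =>
    obtain ⟨name, thr⟩ := a
    by_cases h : total ≥ thr
    · have hd : (decide (((name, thr) : String × Int).2 ≤ total)) = true := by simpa using h
      simp only [pvAGo, h, if_true]
      rw [ih]
      simp only [List.takeWhile_cons, hd, if_true, List.length_cons, Nat.add_one_ne_zero,
        if_false, Nat.add_sub_cancel]
      by_cases hR : (rest.takeWhile (fun q => decide (q.2 ≤ total))).length = 0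
      · cases rest with
        | nil => simp
        | cons b rb => simp [hR]
      · obtain ⟨R', hR'⟩ := Nat.exists_eq_succ_of_ne_zero hR
        cases rest with
        | nil => simp at hR'
        | cons b rb =>
          simp only [hR', Nat.add_one_ne_zero, if_false, Nat.succ_sub_one,
            List.getD_cons_succ, List.length_cons, Nat.add_lt_add_iff_right]
    · have hd : (decide (((name, thr) : String × Int).2 ≤ total)) = false := by simpa using h
      simp only [pvAGo, h, if_false]
      simp [hd]

-- core equivalence on any nonempty value-sorted pairs table
theorem pv_main_core (total : Int) (pairs : List (String × Int)) (hne : pairs ≠ [])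
    (hsorted : pairs.Pairwise (fun a b => a.2 ≤ b.2)) :
    pvAGo total (pairs.headD ("", 0)).1 0 (pairs.headD ("", 0)).2 pairs =
      (if pvBisect (pairs.map (fun p => p.2)) total 0 (pairs.map (fun p => p.2)).length = 0 then
        ((pairs.map (fun p => p.1)).getD 0 "", 0, (pairs.map (fun p => p.2)).getD 0 0)
      else
        ((pairs.map (fun p => p.1)).getD (pvBisect (pairs.map (fun p => p.2)) total 0 (pairs.map (fun p => p.2)).length - 1) "",
         (pairs.map (fun p => p.2)).getD (pvBisect (pairs.map (fun p => p.2)) total 0 (pairs.map (fun p => p.2)).length - 1) 0,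
         if pvBisect (pairs.map (fun p => p.2)) total 0 (pairs.map (fun p => p.2)).length < (pairs.map (fun p => p.2)).length then
           (pairs.map (fun p => p.2)).getD (pvBisect (pairs.map (fun p => p.2)) total 0 (pairs.map (fun p => p.2)).length) 0
         else
           (pairs.map (fun p => p.2)).getD (pvBisect (pairs.map (fun p => p.2)) total 0 (pairs.map (fun p => p.2)).length - 1) 0)) := by
  have hths : (pairs.map (fun p => p.2)).Pairwise (· ≤ ·) := List.pairwise_map.mpr hsorted
  have htw : (pairs.map (fun p => p.2)).takeWhile (fun t => decide (t ≤ total))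
      = (pairs.takeWhile (fun q => decide (q.2 ≤ total))).map (fun p => p.2) :=
    List.takeWhile_map
  have hKle : (pairs.takeWhile (fun q => decide (q.2 ≤ total))).length ≤ pairs.length :=
    (List.takeWhile_prefix _).length_le
  have hbs : pvBisect (pairs.map (fun p => p.2)) total 0 (pairs.map (fun p => p.2)).length
      = (pairs.takeWhile (fun q => decide (q.2 ≤ total))).length := by
    refine pvBisect_eq _ total 0 _ _ hths (le_refl _) (by rw [htw, List.length_map]) (by omega) ?_
    simp [hKle]
  rw [hbs, pvAGo_eq]
  by_cases hK0 : (pairs.takeWhile (fun q => decide (q.2 ≤ total))).length = 0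
  · obtain ⟨a, t, rfl⟩ := List.exists_cons_of_ne_nil hne
    simp [hK0]
  · obtain ⟨K', hK'⟩ := Nat.exists_eq_succ_of_ne_zero hK0
    have hK1 : K' < pairs.length := by omega
    simp only [hK', Nat.add_one_ne_zero, if_false, Nat.succ_sub_one, List.length_map]
    have hn : (pairs.map (fun p => p.1)).getD K' "" = (pairs.getD K' ("", 0)).1 := by
      rw [List.getD_eq_getElem _ _ (by simpa using hK1), List.getD_eq_getElem _ _ hK1,
        List.getElem_map]
    have hth1 : (pairs.map (fun p => p.2)).getD K' 0 = (pairs.getD K' ("", 0)).2 := by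
      rw [List.getD_eq_getElem _ _ (by simpa using hK1), List.getD_eq_getElem _ _ hK1,
        List.getElem_map]
    rw [hn, hth1]
    by_cases hlt : K' + 1 < pairs.length
    · simp [hlt]
    · simp [hlt]

-- ===== VERDICT (by name: the statement is the Claim_ definition above) =====
theorem current_kuliah_stage_py_spec : Claim_equal_current_kuliah_stage_py := by
  intro total kuliah_map _
  show current_kuliah_stage_py total kuliah_map = current_kuliah_stage_py_alt total kuliah_map
  have hne : (if (pvPairsSorted kuliah_map).isEmpty then pvDefaultPairs else pvPairsSorted kuliah_map) ≠ [] := by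
    split
    · simp [pvDefaultPairs]
    · next hemp => simpa [List.isEmpty_iff] using hemp
  have hsorted : (if (pvPairsSorted kuliah_map).isEmpty then pvDefaultPairs else pvPairsSorted kuliah_map).Pairwise (fun a b => a.2 ≤ b.2) := by
    split
    · decide
    · exact PySem.List.sorted_pairwise (PySem.Dict.ofList kuliah_map).items (fun p => p.2)
  exact pv_main_core total _ hne hsorted
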